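-- pv_equiv track=rewrite | github.com/jason-dio-so/insurance-ontology-v3 | utils/test_clean_table.py | remove_empty_columns
-- ===== SOURCE A (Python) =====
-- from typing import List
--
-- def remove_empty_columns(table: List[List[str]]) -> List[List[str]]:
--     """완전히 비어있는 열 제거"""
--     if not table:
--         return table
--
--     num_cols = len(table[0]) if table else 0
--
--     # 각 열이 비어있는지 확인
--     empty_cols = set()
--     for col_idx in range(num_cols):
--         is_empty = all(
--             row[col_idx] == "" if col_idx < len(row) else True
--             for row in table
--         )
--         if is_empty:
--             empty_cols.add(col_idx)
--
--     # 빈 열 제거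
--     if not empty_cols:
--         return table
--
--     result = []
--     for row in table:
--         new_row = [
--             cell for idx, cell in enumerate(row)
--             if idx not in empty_cols
--         ]
--         result.append(new_row)
--
--     return result
-- ===== SOURCE B (Python) =====
-- def remove_empty_columns(table):
--     """Remove fully-empty columns in one row-major pass over all cells."""
--     if not table:
--         return table
--     num_cols = len(table[0])
--     nonempty = set()
--     for row in table:
--         for idx, cell in enumerate(row):
--             if idx < num_cols and cell != "":
--                 nonempty.add(idx)
--     empty_cols = set(range(num_cols)) - nonempty
--     if not empty_cols:
--         return table
--     return [[cell for idx, cell in enumerate(row) if idx not in empty_cols]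
--             for row in table]
-- ===== Notes on version B (the rewrite author's own statement) =====
-- stated objective: alternative
-- what changed: Replaces A's per-column all() scans (column-major, one pass over the table per column) with a single row-major pass that accumulates the set of non-empty column indices, then takes the complement of range(num_cols).
import Mathlib
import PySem

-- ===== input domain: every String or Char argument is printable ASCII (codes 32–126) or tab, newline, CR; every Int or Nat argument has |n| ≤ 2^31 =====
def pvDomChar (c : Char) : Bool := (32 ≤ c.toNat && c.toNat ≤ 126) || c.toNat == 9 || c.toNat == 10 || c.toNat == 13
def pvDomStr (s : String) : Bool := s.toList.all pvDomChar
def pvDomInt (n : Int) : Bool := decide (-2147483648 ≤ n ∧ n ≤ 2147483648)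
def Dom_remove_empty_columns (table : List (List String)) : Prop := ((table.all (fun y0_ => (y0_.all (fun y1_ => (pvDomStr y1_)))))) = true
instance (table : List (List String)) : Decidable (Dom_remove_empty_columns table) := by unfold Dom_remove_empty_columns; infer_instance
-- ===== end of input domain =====

-- B replaces A's per-column all() scans with one row-major pass accumulating the set of
-- non-empty column indices (objective: alternative decomposition; return value proved equal).

-- ===== PORT A =====
-- column-major: for each col_idx in range(num_cols), scan all rows with all(...)
def remove_empty_columns (table : List (List String)) : List (List String) :=
  if table = [] then table
  else
    let num_cols : Int := ((table.headD []).length : Int)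
    let empty_cols : PySem.Set Int :=
      (PySem.List.pyRange 0 num_cols 1).foldl (fun s col_idx =>
        let is_empty := table.all (fun row =>
          if col_idx < (row.length : Int) then PySem.List.pyGetD row col_idx "" == "" else true)
        if is_empty then PySem.Set.add s col_idx else s) PySem.Set.empty
    if empty_cols = [] then table
    else
      -- result = []; for row in table: result.append(new_row)
      table.foldl (fun result row =>
        result ++ [((PySem.List.enumerate row 0).filter
                      (fun p => !(PySem.Set.contains empty_cols p.1))).map (·.2)]) []

-- ===== PORT B =====
-- row-major: one pass over all cells builds the set of non-empty column indices
def remove_empty_columns_alt (table : List (List String)) : List (List String) :=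
  if table = [] then table
  else
    let num_cols : Int := ((table.headD []).length : Int)
    let nonempty : PySem.Set Int :=
      table.foldl (fun s row =>
        (PySem.List.enumerate row 0).foldl (fun s p =>
          if p.1 < num_cols && p.2 != "" then PySem.Set.add s p.1 else s) s) PySem.Set.empty
    let empty_cols : PySem.Set Int :=
      PySem.Set.diff (PySem.Set.ofList (PySem.List.pyRange 0 num_cols 1)) nonempty
    if empty_cols = [] then table
    else
      table.map (fun row =>
        ((PySem.List.enumerate row 0).filter
            (fun p => !(PySem.Set.contains empty_cols p.1))).map (·.2))

-- ===== PRECONDITION & SPEC =====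
def Spec_remove_empty_columns (table : List (List String)) (out : List (List String)) : Prop := out = remove_empty_columns_alt table
instance (table : List (List String)) (out : List (List String)) : Decidable (Spec_remove_empty_columns table out) := by unfold Spec_remove_empty_columns; infer_instance

-- ===== CLAIM (what is proved, stated in full; the proofs are below) =====
def Claim_equal_remove_empty_columns : Prop := ∀ (table : List (List String)), Dom_remove_empty_columns table → Spec_remove_empty_columns table (remove_empty_columns table)

-- ===== LEMMAS AND PROOFS =====

-- membership after a fold of conditional adds (the added element is f of the visited one)
theorem mem_foldl_cond_add {α β : Type} [DecidableEq β] (l : List α) (p : α → Bool)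
    (f : α → β) (s : PySem.Set β) (x : β) :
    (x ∈ l.foldl (fun s a => if p a then PySem.Set.add s (f a) else s) s) ↔
      x ∈ s ∨ ∃ a ∈ l, p a = true ∧ f a = x := by
  induction l generalizing s with
  | nil => simp
  | cons a l ih =>
    simp only [List.foldl_cons, ih, List.mem_cons]
    by_cases h : p a = true
    · simp only [h, if_true, PySem.Set.mem_add]
      constructor
      · rintro ((h1 | h1) | ⟨b, hb, h2, h3⟩)
        · exact Or.inl h1
        · exact Or.inr ⟨a, Or.inl rfl, h, h1.symm⟩
        · exact Or.inr ⟨b, Or.inr hb, h2, h3⟩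
      · rintro (h1 | ⟨b, (hb | hb), h2, h3⟩)
        · exact Or.inl (Or.inl h1)
        · exact Or.inl (Or.inr (by rw [hb] at h3; exact h3.symm))
        · exact Or.inr ⟨b, hb, h2, h3⟩
    · simp only [h]
      constructor
      · rintro (h1 | ⟨b, hb, h2, h3⟩)
        · exact Or.inl h1
        · exact Or.inr ⟨b, Or.inr hb, h2, h3⟩
      · rintro (h1 | ⟨b, (hb | hb), h2, h3⟩)
        · exact Or.inl h1
        · exact absurd (hb ▸ h2) h
        · exact Or.inr ⟨b, hb, h2, h3⟩

-- membership in B's nonempty accumulator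
theorem mem_nonempty {n : Int} (table : List (List String)) (s : PySem.Set Int) (x : Int) :
    (x ∈ table.foldl (fun s row =>
        (PySem.List.enumerate row 0).foldl (fun s p =>
          if p.1 < n && p.2 != "" then PySem.Set.add s p.1 else s) s) s) ↔
      x ∈ s ∨ ∃ row ∈ table, ∃ p ∈ PySem.List.enumerate row 0,
        (p.1 < n && p.2 != "") = true ∧ p.1 = x := by
  induction table generalizing s with
  | nil => simp
  | cons row rows ih =>
    simp only [List.foldl_cons, ih, List.mem_cons]
    have hinner : (x ∈ (PySem.List.enumerate row 0).foldl
        (fun s (p : Int × String) => if p.1 < n && p.2 != "" then PySem.Set.add s p.1 else s) s) ↔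
        x ∈ s ∨ ∃ p ∈ PySem.List.enumerate row 0, (p.1 < n && p.2 != "") = true ∧ p.1 = x := by
      simpa using mem_foldl_cond_add (PySem.List.enumerate row 0)
        (fun p => p.1 < n && p.2 != "") (fun p => p.1) s x
    rw [hinner]
    constructor
    · rintro ((h1 | h2) | ⟨r, hr, hx⟩)
      · exact Or.inl h1
      · exact Or.inr ⟨row, Or.inl rfl, h2⟩
      · rcases hx with ⟨p, hp, h3⟩
        exact Or.inr ⟨r, Or.inr hr, p, hp, h3⟩
    · rintro (h1 | ⟨r, (hr | hr), hx⟩)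
      · exact Or.inl (Or.inl h1)
      · exact Or.inl (Or.inr (hr ▸ hx))
      · exact Or.inr ⟨r, hr, hx⟩

-- A's result-building loop is a map
theorem foldl_append_singleton {α β : Type} (l : List α) (f : α → β) (acc : List β) :
    l.foldl (fun r x => r ++ [f x]) acc = acc ++ l.map f := by
  induction l generalizing acc with
  | nil => simp
  | cons a l ih => simp [ih]

theorem remove_empty_columns_spec : Claim_equal_remove_empty_columns := by
  intro table _
  show remove_empty_columns table = remove_empty_columns_alt table
  unfold remove_empty_columns remove_empty_columns_alt
  by_cases htab : table = []
  · simp [htab]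
  · simp only [htab, if_false]
    set n : Int := ((table.headD []).length : Int) with hn
    set pA : Int → Bool := fun col_idx => table.all (fun row =>
      if col_idx < (row.length : Int) then PySem.List.pyGetD row col_idx "" == "" else true)
      with hpA
    set EA : PySem.Set Int := (PySem.List.pyRange 0 n 1).foldl
      (fun s col_idx => if pA col_idx then PySem.Set.add s col_idx else s) PySem.Set.empty with hEA
    set NB : PySem.Set Int := table.foldl (fun s row =>
        (PySem.List.enumerate row 0).foldl (fun s p =>
          if p.1 < n && p.2 != "" then PySem.Set.add s p.1 else s) s) PySem.Set.empty with hNB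
    set EB : PySem.Set Int :=
      PySem.Set.diff (PySem.Set.ofList (PySem.List.pyRange 0 n 1)) NB with hEB
    have hmem : ∀ x : Int, x ∈ EA ↔ x ∈ EB := by
      intro x
      have hAside : x ∈ EA ↔ x ∈ PySem.Set.empty ∨
          ∃ a ∈ PySem.List.pyRange 0 n 1, pA a = true ∧ a = x := by
        rw [hEA]
        simpa using mem_foldl_cond_add (PySem.List.pyRange 0 n 1) pA (fun a => a)
          PySem.Set.empty x
      rw [hAside, hEB, PySem.Set.mem_diff, PySem.Set.mem_ofList, hNB, mem_nonempty]
      simp only [PySem.Set.empty, List.not_mem_nil, false_or]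
      constructor
      · rintro ⟨a, ha, hpa, rfl⟩
        refine ⟨ha, ?_⟩
        rintro ⟨row, hrow, p, hp, hcond, hpx⟩
        rw [hpA] at hpa
        rw [List.all_eq_true] at hpa
        have hrr := hpa row hrow
        rw [PySem.List.mem_enumerate_iff] at hp
        obtain ⟨k, hk, rfl⟩ := hp
        simp only [zero_add] at hcond hpx
        simp only [Bool.and_eq_true, decide_eq_true_eq, bne_iff_ne, ne_eq] at hcond
        subst hpx
        have hklt : (k : Int) < (row.length : Int) := by exact_mod_cast hk
        rw [if_pos hklt] at hrr
        apply hcond.2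
        have hg : PySem.List.pyGetD row (k : Int) "" = "" := by
          simpa using hrr
        rw [PySem.List.pyGetD_natCast] at hg
        rwa [List.getD_eq_getElem _ _ hk] at hg
      · rintro ⟨hx, hnone⟩
        refine ⟨x, hx, ?_, rfl⟩
        rw [hpA, List.all_eq_true]
        intro row hrow
        by_cases hlt : x < (row.length : Int)
        · rw [if_pos hlt]
          by_contra hne
          apply hnone
          have hx0 : 0 ≤ x := (PySem.List.mem_pyRange_one.mp hx).1
          obtain ⟨k, rfl⟩ := Int.eq_ofNat_of_zero_le hx0
          have hk : k < row.length := by exact_mod_cast hlt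
          refine ⟨row, hrow, ((k : Int), row[k]), ?_, ?_, rfl⟩
          · rw [PySem.List.mem_enumerate_iff]
            exact ⟨k, hk, by simp⟩
          · simp only [Bool.and_eq_true, decide_eq_true_eq, bne_iff_ne, ne_eq]
            refine ⟨(PySem.List.mem_pyRange_one.mp hx).2, ?_⟩
            intro hcell
            apply hne
            have hcell' : row[k] = "" := hcell
            rw [PySem.List.pyGetD_natCast, List.getD_eq_getElem _ _ hk, hcell']
            simp
        · rw [if_neg hlt]
    have hempty : (EA = []) ↔ (EB = []) := by
      constructor <;> intro h <;> rw [List.eq_nil_iff_forall_not_mem] <;>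
        intro x <;> have hx := hmem x <;> simp [h] at hx ⊢ <;> tauto
    have hcontains : ∀ x : Int, PySem.Set.contains EA x = PySem.Set.contains EB x := by
      intro x
      have hx := hmem x
      rcases hA : PySem.Set.contains EA x <;> rcases hB : PySem.Set.contains EB x <;>
        simp_all
    by_cases hE : EA = []
    · rw [if_pos hE, if_pos (hempty.mp hE)]
    · rw [if_neg hE, if_neg (fun h => hE (hempty.mpr h))]
      rw [foldl_append_singleton, List.nil_append]
      apply List.map_congr_left
      intro row _
      congr 1
      apply List.filter_congr
      intro p _
      rw [hcontains]
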